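-- pv_equiv track=rewrite | github.com/peregilk/syntetisk-med-asr | tts/tts_optimalization/split_sentences.py | _build_sentence_lengths
-- ===== SOURCE A (Python) =====
-- def _build_sentence_lengths(sentences: list[str]) -> list[int]:
-- 	lengths = [0]
-- 	running = 0
-- 	for index, sentence in enumerate(sentences):
-- 		running += len(sentence)
-- 		if index > 0:
-- 			running += 1
-- 		lengths.append(running)
-- 	return lengths
-- ===== SOURCE B (Python) =====
-- def _build_sentence_lengths(sentences: list[str]) -> list[int]:
-- 	# Characterization-based: entry k is literally the length of the first k
-- 	# sentences joined with a one-character separator; no running accumulator.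
-- 	return [len(" ".join(sentences[:k])) for k in range(len(sentences) + 1)]
-- ===== Notes on version B (the rewrite author's own statement) =====
-- stated objective: alternative
-- what changed: Replaces A's stateful running-total loop by a direct characterization: entry k is computed independently as len(" ".join(sentences[:k])), with no accumulator or index branch.
import Mathlib
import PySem

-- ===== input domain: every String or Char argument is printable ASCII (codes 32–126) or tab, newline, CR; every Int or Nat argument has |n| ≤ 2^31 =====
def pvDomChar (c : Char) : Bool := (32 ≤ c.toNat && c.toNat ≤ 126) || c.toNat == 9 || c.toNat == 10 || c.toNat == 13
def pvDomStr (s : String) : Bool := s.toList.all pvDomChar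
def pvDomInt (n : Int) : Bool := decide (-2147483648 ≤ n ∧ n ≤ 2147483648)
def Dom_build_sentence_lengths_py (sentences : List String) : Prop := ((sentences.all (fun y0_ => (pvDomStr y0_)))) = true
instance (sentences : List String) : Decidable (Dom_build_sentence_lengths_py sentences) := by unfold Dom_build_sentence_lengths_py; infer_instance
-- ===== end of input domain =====

-- B drops A's running total entirely: entry k is computed independently as the
-- length of the first k sentences joined with a one-character separator (alternative algorithm, not faster).

-- ===== PORT A =====
def build_sentence_lengths_py (sentences : List String) : List Int :=
  ((PySem.List.enumerate sentences 0).foldl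
    (fun (st : List Int × Int) p =>
      let running := st.2 + PySem.Str.len p.2
      let running := if p.1 > 0 then running + 1 else running
      (st.1 ++ [running], running))
    ([0], 0)).1

-- ===== PORT B =====
def build_sentence_lengths_py_alt (sentences : List String) : List Int :=
  (PySem.List.pyRange 0 ((sentences.length : Int) + 1) 1).map
    (fun k => PySem.Str.len (PySem.Str.join " " (PySem.List.slice sentences none (some k))))

-- ===== PRECONDITION & SPEC =====
def Spec_build_sentence_lengths_py (sentences : List String) (out : List Int) : Prop := out = build_sentence_lengths_py_alt sentences
instance (sentences : List String) (out : List Int) : Decidable (Spec_build_sentence_lengths_py sentences out) := by unfold Spec_build_sentence_lengths_py; infer_instance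

-- ===== CLAIM (what is proved, stated in full; the proofs are below) =====
def Claim_equal_build_sentence_lengths_py : Prop := ∀ (sentences : List String), Dom_build_sentence_lengths_py sentences → Spec_build_sentence_lengths_py sentences (build_sentence_lengths_py sentences)

-- ===== LEMMAS AND PROOFS =====

-- prefix sums where every step adds its sentence length plus one separator
def pvPfx2 : List String → Int → List Int
  | [], _ => []
  | s :: xs, r => (r + PySem.Str.len s + 1) :: pvPfx2 xs (r + PySem.Str.len s + 1)

theorem pvFoldA (xs : List String) : ∀ (i : Int) (acc : List Int) (r : Int), 1 ≤ i →
    ((PySem.List.enumerate xs i).foldl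
      (fun (st : List Int × Int) p =>
        (st.1 ++ [if p.1 > 0 then st.2 + PySem.Str.len p.2 + 1 else st.2 + PySem.Str.len p.2],
         if p.1 > 0 then st.2 + PySem.Str.len p.2 + 1 else st.2 + PySem.Str.len p.2)) (acc, r)).1 = acc ++ pvPfx2 xs r := by
  induction xs with
  | nil => intro i acc r _; simp [PySem.List.enumerate_nil, pvPfx2]
  | cons s xs ih =>
    intro i acc r hi
    have hpos : i > 0 := hi
    simp only [PySem.List.enumerate_cons, List.foldl_cons, if_pos hpos]
    rw [ih (i + 1) _ _ (by omega)]
    simp [pvPfx2]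

-- character length of a join of a nonempty list of parts
theorem pvJoinLen (qs : List (List Char)) : ∀ (p sep : List Char),
    (PySem.Chars.join sep (p :: qs)).length
      = p.length + ((qs.map List.length).sum + sep.length * qs.length) := by
  induction qs with
  | nil => intro p sep; simp [PySem.Chars.join_singleton]
  | cons q qs ih =>
    intro p sep
    rw [PySem.Chars.join_cons_cons]
    simp only [List.length_append, ih q sep, List.map_cons, List.sum_cons, List.length_cons]
    ring

-- the index-k entry of B, for k sentences of xs already consumed, as a closed form
theorem pvRangeMap (xs : List String) : ∀ (r : Int),
    (List.range (xs.length + 1)).map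
      (fun k => r + (((xs.take k).map (fun s => (s.toList.length : Int))).sum + k))
      = r :: pvPfx2 xs r := by
  induction xs with
  | nil => intro r; simp [pvPfx2]
  | cons s xs ih =>
    intro r
    rw [show (s :: xs).length + 1 = (xs.length + 1) + 1 from by simp,
        List.range_succ_eq_map, List.map_cons, List.map_map]
    have hfun : ((fun k => r + (((((s :: xs).take k).map (fun t => ((t.toList.length : Int)))).sum + k))) ∘ Nat.succ)
        = fun k => (r + (s.toList.length : Int) + 1) + (((xs.take k).map (fun t => ((t.toList.length : Int)))).sum + k) := by
      funext k
      simp only [Function.comp, List.take_succ_cons, List.map_cons, List.sum_cons]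
      push_cast
      ring
    rw [hfun, ih (r + (s.toList.length : Int) + 1)]
    simp only [pvPfx2, PySem.Str.len_eq]
    norm_num

-- B's entry at index k equals the closed form, for k ≤ xs.length (head sentence s)
theorem pvBEntry (s : String) (xs : List String) (k : Nat) (hk : k ≤ xs.length) :
    PySem.Str.len (PySem.Str.join " " ((s :: xs).take (k + 1)))
      = (s.toList.length : Int) + (((xs.take k).map (fun t => (t.toList.length : Int))).sum + k) := by
  rw [PySem.Str.len_eq, PySem.Str.toList_join, List.take_succ_cons, List.map_cons]
  rw [pvJoinLen ((xs.take k).map String.toList) s.toList (" ".toList)]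
  have hcnt : ((xs.take k).map String.toList).length = k := by
    simp [List.length_take, Nat.min_eq_left hk]
  rw [hcnt]
  push_cast
  simp only [List.map_map, Function.comp_def, List.length_cons, List.length_nil]
  ring

-- B, written over a plain Nat range of take-prefixes, equals 0 followed by A's list shape
theorem pvB_closed (ys : List String) :
    (List.range (ys.length + 1)).map (fun k : Nat => PySem.Str.len (PySem.Str.join " " (ys.take k)))
      = 0 :: (match ys with
              | [] => []
              | s :: xs => PySem.Str.len s :: pvPfx2 xs (PySem.Str.len s)) := by
  cases ys with
  | nil =>
    simp [PySem.Str.len_eq, PySem.Str.toList_join, PySem.Chars.join_nil]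
  | cons s xs =>
    rw [show (s :: xs).length + 1 = (xs.length + 1) + 1 from by simp,
        List.range_succ_eq_map, List.map_cons, List.map_map]
    have hhead : PySem.Str.len (PySem.Str.join " " ((s :: xs).take 0)) = 0 := by
      simp [PySem.Str.len_eq, PySem.Str.toList_join, PySem.Chars.join_nil]
    rw [hhead]
    have htail : ((List.range (xs.length + 1)).map
        ((fun k : Nat => PySem.Str.len (PySem.Str.join " " ((s :: xs).take k))) ∘ Nat.succ))
        = (List.range (xs.length + 1)).map
            (fun k => (s.toList.length : Int) + (((xs.take k).map (fun t => (t.toList.length : Int))).sum + k)) := by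
      apply List.map_congr_left
      intro k hk
      have hk' : k ≤ xs.length := by
        have := List.mem_range.mp hk; omega
      simp only [Function.comp]
      exact pvBEntry s xs k hk'
    rw [htail, pvRangeMap xs ((s.toList.length : Int))]
    simp [PySem.Str.len_eq]

-- ===== VERDICT (by name: the statement is the Claim_ definition above) =====
theorem build_sentence_lengths_py_spec : Claim_equal_build_sentence_lengths_py := by
  intro sentences _
  show build_sentence_lengths_py sentences = build_sentence_lengths_py_alt sentences
  unfold build_sentence_lengths_py build_sentence_lengths_py_alt
  rw [PySem.List.pyRange_one]
  simp only [zero_add, sub_zero]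
  have hrange : ((sentences.length : Int) + 1).toNat = sentences.length + 1 := by omega
  rw [hrange, List.map_map]
  have hB : ((fun k : Int => PySem.Str.len (PySem.Str.join " " (PySem.List.slice sentences none (some k)))) ∘ (fun k : Nat => (k : Int)))
      = fun k : Nat => PySem.Str.len (PySem.Str.join " " (sentences.take k)) := by
    funext k
    simp only [Function.comp]
    rw [PySem.List.slice_to_natCast]
  rw [hB, pvB_closed]
  cases sentences with
  | nil => simp [PySem.List.enumerate_nil]
  | cons s xs =>
    simp only [PySem.List.enumerate_cons, List.foldl_cons]
    rw [pvFoldA xs (0 + 1) _ _ (by norm_num)]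
    simp
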